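-- pv_equiv track=rewrite | github.com/xyanglian/samplework | Python/APT5/StartLetters.py | howManyLetters
-- ===== SOURCE A (Python) =====
-- def howManyLetters(phrase):
--     lst = []
--     num = 0
--     words = phrase.split()
--     for i in range(len(words)):
--         wordslower = words[i][0].lower()
--         lst.append(wordslower)
--
--     if lst != []:
--         st = set(lst)
--     else:
--         num = 0
--         return num
--
--     for i in range(len(st)):
--         num += 1
--     return num
-- ===== SOURCE B (Python) =====
-- def howManyLetters(phrase):
--     firsts = sorted(w[0].lower() for w in phrase.split())
--     count = 0
--     prev = None
--     for c in firsts: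
--         if c != prev:
--             count += 1
--             prev = c
--     return count
-- ===== Notes on version B (the rewrite author's own statement) =====
-- stated objective: alternative
-- what changed: Replaces hash-set deduplication plus a counting loop over the set with sorting the lowercased first letters and counting, in one pass, positions that differ from their predecessor.
import Mathlib
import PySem

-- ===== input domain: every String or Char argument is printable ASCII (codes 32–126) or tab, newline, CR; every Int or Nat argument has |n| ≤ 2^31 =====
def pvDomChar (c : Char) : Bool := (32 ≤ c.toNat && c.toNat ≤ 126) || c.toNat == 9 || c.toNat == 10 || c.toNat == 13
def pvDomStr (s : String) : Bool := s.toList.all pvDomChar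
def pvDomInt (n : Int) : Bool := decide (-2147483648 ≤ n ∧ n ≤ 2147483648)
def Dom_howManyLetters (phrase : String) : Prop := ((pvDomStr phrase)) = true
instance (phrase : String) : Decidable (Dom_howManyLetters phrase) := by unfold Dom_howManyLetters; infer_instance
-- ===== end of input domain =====

-- B sorts the lowercased first letters and counts adjacent changes instead of A's set-dedup + counting loop.

-- ===== PORT A =====
def howManyLetters (phrase : String) : Int :=
  let words := PySem.Str.split₀ phrase
  let lst := (PySem.List.pyRange 0 (PySem.List.len words) 1).foldl
    (fun lst i =>
      lst ++ [PySem.Chars.lowerChar (PySem.List.pyGetD (PySem.List.pyGetD words i "").toList 0 ' ')]) []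
  if lst ≠ [] then
    let st := PySem.Set.ofList lst
    (PySem.List.pyRange 0 (PySem.List.len st) 1).foldl (fun num _ => num + 1) (0 : Int)
  else (0 : Int)

-- ===== PORT B =====
def howManyLetters_alt (phrase : String) : Int :=
  let firsts := PySem.List.sorted
    ((PySem.Str.split₀ phrase).map
      (fun w => PySem.Chars.lowerChar (PySem.List.pyGetD w.toList 0 ' ')))
    (fun x => x) false
  (firsts.foldl
    (fun st c => if some c ≠ st.2 then (st.1 + 1, some c) else st)
    ((0 : Int), (none : Option Char))).1

-- ===== PRECONDITION & SPEC =====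
def Spec_howManyLetters (phrase : String) (out : Int) : Prop := out = howManyLetters_alt phrase
instance (phrase : String) (out : Int) : Decidable (Spec_howManyLetters phrase out) := by unfold Spec_howManyLetters; infer_instance

-- ===== CLAIM (what is proved, stated in full; the proofs are below) =====
def Claim_equal_howManyLetters : Prop := ∀ (phrase : String), Dom_howManyLetters phrase → Spec_howManyLetters phrase (howManyLetters phrase)

-- ===== LEMMAS AND PROOFS =====

theorem card_insert_eq_card_erase_add_one (x : Char) (s : Finset Char) :
    (insert x s).card = (s.erase x).card + 1 := by
  by_cases hx : x ∈ s
  · rw [Finset.insert_eq_self.mpr hx, Finset.card_erase_of_mem hx]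
    have := Finset.card_pos.mpr ⟨x, hx⟩
    omega
  · rw [Finset.card_insert_of_notMem hx, Finset.erase_eq_of_notMem hx]

theorem foldl_count_const (l : List Int) (n : Int) :
    l.foldl (fun a _ => a + 1) n = n + l.length := by
  induction l generalizing n with
  | nil => simp
  | cons x xs ih => simp [List.foldl, ih]; omega

theorem ofList_length_eq_card (l : List Char) :
    ((PySem.Set.ofList l).length : Int) = l.toFinset.card := by
  have hf : (PySem.Set.ofList l).toFinset = l.toFinset := by
    ext x; simp [List.mem_toFinset, PySem.Set.mem_ofList]
  rw [← List.toFinset_card_of_nodup (PySem.Set.nodup_ofList l), hf]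

theorem adj_count_some (xs : List Char) (hs : xs.Pairwise (· ≤ ·)) (n : Int) (p : Char)
    (hp : ∀ y ∈ xs, p ≤ y) :
    (xs.foldl (fun st c => if some c ≠ st.2 then (st.1 + 1, some c) else st) (n, some p)).1
      = n + (xs.toFinset.erase p).card := by
  induction xs generalizing n p with
  | nil => simp
  | cons x xs ih =>
    rw [List.pairwise_cons] at hs
    obtain ⟨hx, hs'⟩ := hs
    by_cases hxp : x = p
    · subst hxp
      simp only [List.foldl, ne_eq, not_true_eq_false, if_neg, not_false_eq_true]
      rw [ih hs' n x hx]
      simp [Finset.erase_insert_eq_erase]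
    · have hstep : (if some x ≠ some p then (n + 1, some x) else (n, some p)) = (n + 1, some x) := by
        simp [hxp]
      simp only [List.foldl]
      rw [hstep, ih hs' (n + 1) x hx]
      have hpx : p ≤ x := hp x (List.mem_cons_self)
      have hpm : p ∉ insert x xs.toFinset := by
        simp only [Finset.mem_insert, List.mem_toFinset]
        rintro (h | h)
        · exact hxp h.symm
        · exact hxp (le_antisymm (hx p h) hpx)
      rw [List.toFinset_cons, Finset.erase_eq_of_notMem hpm,
        card_insert_eq_card_erase_add_one]
      omega

theorem adj_count_none (xs : List Char) (hs : xs.Pairwise (· ≤ ·)) (n : Int) :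
    (xs.foldl (fun st c => if some c ≠ st.2 then (st.1 + 1, some c) else st) (n, none)).1
      = n + xs.toFinset.card := by
  cases xs with
  | nil => simp
  | cons x xs =>
    rw [List.pairwise_cons] at hs
    obtain ⟨hx, hs'⟩ := hs
    simp only [List.foldl, ne_eq, reduceCtorEq, not_false_eq_true, reduceIte]
    rw [adj_count_some xs hs' (n + 1) x hx, List.toFinset_cons,
      card_insert_eq_card_erase_add_one]
    omega

theorem lst_eq_map (words : List String) :
    (PySem.List.pyRange 0 (PySem.List.len words) 1).foldl
      (fun lst i =>
        lst ++ [PySem.Chars.lowerChar (PySem.List.pyGetD (PySem.List.pyGetD words i "").toList 0 ' ')]) []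
      = words.map (fun w => PySem.Chars.lowerChar (PySem.List.pyGetD w.toList 0 ' ')) := by
  rw [PySem.List.foldl_pyRange_zero_pyGetD words ""
    (fun acc w => acc ++ [PySem.Chars.lowerChar (PySem.List.pyGetD w.toList 0 ' ')]) []]
  simpa using PySem.List.foldl_append_singleton_eq_map
    (fun w => PySem.Chars.lowerChar (PySem.List.pyGetD w.toList 0 ' ')) words []

theorem core_eq (l : List Char) :
    (if l ≠ [] then
      (PySem.List.pyRange 0 (PySem.List.len (PySem.Set.ofList l)) 1).foldl
        (fun num _ => num + 1) (0 : Int)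
    else (0 : Int))
    = ((PySem.List.sorted l (fun x => x) false).foldl
        (fun st c => if some c ≠ st.2 then (st.1 + 1, some c) else st)
        ((0 : Int), (none : Option Char))).1 := by
  have hsortp : (PySem.List.sorted l (fun x => x) false).Pairwise (· ≤ ·) :=
    PySem.List.sorted_pairwise l (fun x => x)
  rw [adj_count_none _ hsortp 0,
    List.toFinset_eq_of_perm _ _ (PySem.List.sorted_perm l (fun x => x) false)]
  by_cases hl : l = []
  · subst hl; simp
  · rw [if_pos hl, foldl_count_const, PySem.List.length_pyRange_one]
    rw [← ofList_length_eq_card]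
    simp [PySem.List.len]

-- ===== VERDICT (by name: the statement is the Claim_ definition above) =====
theorem howManyLetters_spec : Claim_equal_howManyLetters := by
  intro phrase _
  unfold Spec_howManyLetters
  simp only [howManyLetters, howManyLetters_alt, lst_eq_map]
  exact core_eq _
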